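-- pv_equiv track=rewrite | github.com/spyoungtech/adventofcode2021 | aoc2021/day3/part1.py | compute
-- ===== SOURCE A (Python) =====
-- def compute(s: str) -> int:
--     lines = s.splitlines()
--     gamma = 0
--
--     counts = [0] * len(lines[0])
--
--     for line in lines:
--         for i, c in enumerate(line):
--             if c == '0':
--                 counts[i] += 1
--     gamma = []
--     epsilon = []
--     for bit, c in enumerate(counts):
--         if c >= len(lines) // 2:
--             g = '0'
--             e = '1'
--         else:
--             g = '1'
--             e = '0'
--         gamma.append(g)
--         epsilon.append(e)
--     gamma_str = ''.join(gamma)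
--     epsilon_str = ''.join(epsilon)
--     return int(gamma_str, 2) * int(epsilon_str, 2)
--
--     return 0
-- ===== SOURCE B (Python) =====
-- def compute(s: str) -> int:
--     lines = s.splitlines()
--     width = len(lines[0])
--     half = len(lines) // 2
--     gamma = 0
--     for j in range(width):
--         zeros = sum(1 for line in lines if j < len(line) and line[j] == '0')
--         gamma = gamma * 2 + (0 if zeros >= half else 1)
--     return gamma * ((1 << width) - 1 - gamma)
-- ===== Notes on version B (the rewrite author's own statement) =====
-- stated objective: alternative
-- what changed: B traverses columns (column-major: one zero-count per column of the width given by the first line) and accumulates gamma directly as an integer, deriving epsilon arithmetically as its bitwise complement (2^width - 1 - gamma), instead of A's row-major mutable counts array followed by building two parallel bit-character lists joined and re-parsed with int(s, 2).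
import Mathlib
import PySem

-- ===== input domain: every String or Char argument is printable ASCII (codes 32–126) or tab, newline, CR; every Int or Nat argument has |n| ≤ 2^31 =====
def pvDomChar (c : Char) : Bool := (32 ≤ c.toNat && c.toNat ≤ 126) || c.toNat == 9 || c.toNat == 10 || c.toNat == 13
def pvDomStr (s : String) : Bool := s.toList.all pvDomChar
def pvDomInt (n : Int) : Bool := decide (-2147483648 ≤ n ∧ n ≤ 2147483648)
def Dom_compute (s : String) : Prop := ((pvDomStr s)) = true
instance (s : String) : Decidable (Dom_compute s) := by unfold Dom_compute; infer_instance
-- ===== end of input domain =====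

-- B recomputes the same gamma/epsilon product column-major with an integer accumulator
-- and epsilon as the arithmetic complement of gamma (objective: alternative decomposition, not faster).

-- ===== PORT A =====
-- hand port of int(str, 2): exact for the strings this program feeds it —
-- possibly-empty strings of '0'/'1' digits only (no sign, whitespace, underscore or 0b prefix);
-- none exactly where Python raises ValueError (empty string here).
def pvIntBase2? (cs : List Char) : Option Int :=
  if cs ≠ [] ∧ cs.all (fun c => c == '0' || c == '1') then
    some (cs.foldl (fun a c => a * 2 + (if c = '1' then 1 else 0)) 0)
  else none

def compute (s : String) : Int :=
  let lines := PySem.Str.splitlines s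
  let counts0 : List Int := List.replicate ((PySem.List.pyGet? lines 0).getD "").toList.length 0
  let counts := lines.foldl (fun cs line =>
      (PySem.List.enumerate line.toList 0).foldl (fun cs ic =>
          if ic.2 = '0' then PySem.List.pySetD cs ic.1 (PySem.List.pyGetD cs ic.1 0 + 1)
          else cs) cs) counts0
  let ge := counts.foldl (fun (p : List Char × List Char) c =>
      if c ≥ PySem.Int.floordiv (PySem.List.len lines) 2 then (p.1 ++ ['0'], p.2 ++ ['1'])
      else (p.1 ++ ['1'], p.2 ++ ['0'])) ([], [])
  (pvIntBase2? ge.1).getD 0 * (pvIntBase2? ge.2).getD 0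

-- ===== PORT B =====
def compute_alt (s : String) : Int :=
  let lines := PySem.Str.splitlines s
  let width := ((PySem.List.pyGet? lines 0).getD "").toList.length
  let half := PySem.Int.floordiv (PySem.List.len lines) 2
  -- range(width) with width : Nat is exactly List.range width
  let gamma := (List.range width).foldl (fun g j =>
      let zeros : Int := lines.foldl (fun n line =>
          if j < line.toList.length ∧ line.toList.getD j ' ' = '0' then n + 1 else n) 0
      g * 2 + (if zeros ≥ half then 0 else 1)) 0
  gamma * ((2 ^ width : Int) - 1 - gamma)

-- ===== PRECONDITION & SPEC =====
-- Pre_: A raises IndexError when s has no lines, or a later line is longer than the first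
-- (counts[i] += 1 out of range), and ValueError (int('', 2)) when the first line is empty.
def Pre_compute (s : String) : Prop :=
  PySem.Str.splitlines s ≠ [] ∧
  0 < (((PySem.Str.splitlines s).headD "").toList.length) ∧
  ∀ line ∈ PySem.Str.splitlines s,
    line.toList.length ≤ (((PySem.Str.splitlines s).headD "").toList.length)
instance (s : String) : Decidable (Pre_compute s) := by unfold Pre_compute; infer_instance
def pvWitness_compute : String := "10\n01\n11"

def Spec_compute (s : String) (out : Int) : Prop := out = compute_alt s
instance (s : String) (out : Int) : Decidable (Spec_compute s out) := by unfold Spec_compute; infer_instance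

-- ===== CLAIM (what is proved, stated in full; the proofs are below) =====
def Claim_equal_compute : Prop := ∀ (s : String), Dom_compute s → Pre_compute s → Spec_compute s (compute s)

-- ===== LEMMAS AND PROOFS =====

-- L1: effect of one line's enumerate-fold on the counts list
theorem pvCountLine (chars : List Char) : ∀ (k : Nat) (cs : List Int), k + chars.length ≤ cs.length →
    ((PySem.List.enumerate chars (k:Int)).foldl (fun cs ic =>
        if ic.2 = '0' then PySem.List.pySetD cs ic.1 (PySem.List.pyGetD cs ic.1 0 + 1) else cs) cs).length = cs.length ∧
    ∀ j : Nat, ((PySem.List.enumerate chars (k:Int)).foldl (fun cs ic =>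
        if ic.2 = '0' then PySem.List.pySetD cs ic.1 (PySem.List.pyGetD cs ic.1 0 + 1) else cs) cs).getD j 0 =
      cs.getD j 0 + (if k ≤ j ∧ j - k < chars.length ∧ chars.getD (j - k) ' ' = '0' then 1 else 0) := by
  induction chars with
  | nil => intro k cs h; simp [PySem.List.enumerate_nil]
  | cons c tl ih =>
    intro k cs h
    simp only [List.length_cons] at h
    rw [PySem.List.enumerate_cons, List.foldl_cons]
    have hk1 : ((k:Int) + 1) = ((k+1 : Nat) : Int) := by push_cast; ring
    set cs' : List Int := (if c = '0' then PySem.List.pySetD cs (k:Int) (PySem.List.pyGetD cs (k:Int) 0 + 1) else cs) with hcs'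
    have hlen' : cs'.length = cs.length := by
      rw [hcs']; split <;> simp [PySem.List.pySetD_natCast]
    have hcsg : ∀ j : Nat, cs'.getD j 0 = cs.getD j 0 + (if j = k ∧ c = '0' then 1 else 0) := by
      intro j
      rw [hcs']
      by_cases hc : c = '0'
      · simp only [hc, if_pos rfl, PySem.List.pySetD_natCast, PySem.List.pyGetD_natCast]
        by_cases hj : j = k
        · subst hj
          have hlt : j < cs.length := by omega
          simp [List.getD_eq_getElem?_getD, List.getElem?_set, hlt]
        · simp [List.getD_eq_getElem?_getD, List.getElem?_set, Ne.symm hj, hj]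
      · simp [hc]
    have hlen2 : (k+1) + tl.length ≤ cs'.length := by omega
    obtain ⟨ihl, ihg⟩ := ih (k+1) cs' hlen2
    rw [hk1]
    refine ⟨by rw [ihl, hlen'], ?_⟩
    intro j
    rw [ihg j, hcsg j]
    by_cases hjk : j = k
    · subst hjk
      have : ¬ (j + 1 ≤ j) := by omega
      simp only [this, false_and, if_false]
      have : j - j = 0 := by omega
      simp [this]
    · by_cases hlt : j < k
      · have h1 : ¬ (k ≤ j) := by omega
        have h2 : ¬ (k + 1 ≤ j) := by omega
        simp [h1, h2, hjk]
      · have hgt : k < j := by omega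
        have h1 : k ≤ j := by omega
        have h2 : k + 1 ≤ j := by omega
        have h3 : j - k = (j - (k+1)) + 1 := by omega
        have h4 : (j - (k+1)) + 1 < tl.length + 1 ↔ j - (k+1) < tl.length := by omega
        simp [h3, List.getD_cons_succ, List.length_cons, h1, h2, h4, hjk]
-- L2: the whole counting loop computes, at each column, the number of '0's in that column
theorem pvCountAll (lines : List String) : ∀ (cs : List Int), (∀ line ∈ lines, line.toList.length ≤ cs.length) →
    (lines.foldl (fun cs line => (PySem.List.enumerate line.toList 0).foldl (fun cs ic =>
        if ic.2 = '0' then PySem.List.pySetD cs ic.1 (PySem.List.pyGetD cs ic.1 0 + 1) else cs) cs) cs).length = cs.length ∧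
    ∀ j : Nat, (lines.foldl (fun cs line => (PySem.List.enumerate line.toList 0).foldl (fun cs ic =>
        if ic.2 = '0' then PySem.List.pySetD cs ic.1 (PySem.List.pyGetD cs ic.1 0 + 1) else cs) cs) cs).getD j 0 =
      cs.getD j 0 + ((lines.countP (fun line => decide (j < line.toList.length ∧ line.toList.getD j ' ' = '0'))) : Int) := by
  induction lines with
  | nil => intro cs h; simp
  | cons l tl ih =>
    intro cs h
    simp only [List.foldl_cons]
    have h0 : (0:Nat) + l.toList.length ≤ cs.length := by
      have := h l (by simp); omega
    have hline := pvCountLine l.toList 0 cs (by omega)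
    simp only [Nat.cast_zero] at hline
    obtain ⟨hl1, hg1⟩ := hline
    set cs' := (PySem.List.enumerate l.toList (0:Int)).foldl (fun cs ic =>
        if ic.2 = '0' then PySem.List.pySetD cs ic.1 (PySem.List.pyGetD cs ic.1 0 + 1) else cs) cs with hcs'
    have hle' : ∀ line ∈ tl, line.toList.length ≤ cs'.length := by
      intro line hm; rw [hl1]; exact h line (by simp [hm])
    obtain ⟨ihl, ihg⟩ := ih cs' hle'
    refine ⟨by rw [ihl, hl1], ?_⟩
    intro j
    rw [ihg j, hg1 j]
    rw [List.countP_cons]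
    simp only [Nat.le_zero, Nat.sub_zero, Nat.zero_le, true_and, decide_eq_true_eq]
    push_cast
    split_ifs <;> ring
-- L3: the gamma/epsilon string loop builds the per-column bit maps
theorem pvGeFold (h : Int) (counts : List Int) : ∀ (G E : List Char),
    counts.foldl (fun (p : List Char × List Char) c =>
      if c ≥ h then (p.1 ++ ['0'], p.2 ++ ['1']) else (p.1 ++ ['1'], p.2 ++ ['0'])) (G, E) =
    (G ++ counts.map (fun c => if c ≥ h then '0' else '1'),
     E ++ counts.map (fun c => if c ≥ h then '1' else '0')) := by
  induction counts with
  | nil => intro G E; simp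
  | cons c tl ih =>
    intro G E
    simp only [List.foldl_cons, List.map_cons]
    by_cases hc : c ≥ h
    · rw [if_pos hc, ih (G ++ ['0']) (E ++ ['1'])]; simp [hc]
    · rw [if_neg hc, ih (G ++ ['1']) (E ++ ['0'])]; simp [hc]

-- L4: the two bit-value folds are arithmetic complements
theorem pvCompSum (h : Int) (l : List Int) : ∀ (a b : Int),
    l.foldl (fun x c => x * 2 + (if c ≥ h then 0 else 1)) a +
    l.foldl (fun x c => x * 2 + (if c ≥ h then 1 else 0)) b = (a + b + 1) * 2 ^ l.length - 1 := by
  induction l with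
  | nil => intro a b; simp
  | cons c tl ih =>
    intro a b
    simp only [List.foldl_cons, List.length_cons, ih]
    rw [pow_succ]
    split_ifs <;> ring

-- L5: a left fold over a list is the fold over its index range
theorem pvFoldlRange (f : Int → Int → Int) (l : List Int) (i : Int) :
    l.foldl f i = (List.range l.length).foldl (fun a j => f a (l.getD j 0)) i := by
  induction l using List.reverseRecOn with
  | nil => simp
  | append_singleton l x ih =>
    rw [List.foldl_append, List.length_append, List.length_singleton, List.range_succ,
        List.foldl_append]
    simp only [List.foldl_cons, List.foldl_nil]
    have h1 : (List.range l.length).foldl (fun a j => f a ((l ++ [x]).getD j 0)) i =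
        (List.range l.length).foldl (fun a j => f a (l.getD j 0)) i := by
      apply PySem.List.foldl_congr_mem
      intro acc j hj
      rw [List.mem_range] at hj
      rw [List.getD_append _ _ _ _ hj]
    have h2 : (l ++ [x]).getD l.length 0 = x := by
      simp [List.getD_eq_getElem?_getD, List.getElem?_append_right (le_refl l.length)]
    rw [h1, h2, ih]

-- the hand-ported int(·, 2) evaluates the gamma bit map
theorem pvValG (h : Int) (t : List Int) (ht : t ≠ []) :
    pvIntBase2? (t.map (fun c => if c ≥ h then '0' else '1')) =
      some (t.foldl (fun a c => a * 2 + (if c ≥ h then 0 else 1)) 0) := by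
  unfold pvIntBase2?
  rw [if_pos]
  · rw [List.foldl_map]
    congr 1
    apply PySem.List.foldl_congr_mem
    intro acc c _
    by_cases hc : c ≥ h <;> simp [hc]
  · refine ⟨by simp [ht], ?_⟩
    rw [List.all_map]
    apply List.all_eq_true.mpr
    intro c _
    simp only [Function.comp_apply]
    split_ifs <;> rfl

-- the hand-ported int(·, 2) evaluates the epsilon bit map
theorem pvValE (h : Int) (t : List Int) (ht : t ≠ []) :
    pvIntBase2? (t.map (fun c => if c ≥ h then '1' else '0')) =
      some (t.foldl (fun a c => a * 2 + (if c ≥ h then 1 else 0)) 0) := by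
  unfold pvIntBase2?
  rw [if_pos]
  · rw [List.foldl_map]
    congr 1
    apply PySem.List.foldl_congr_mem
    intro acc c _
    by_cases hc : c ≥ h <;> simp [hc]
  · refine ⟨by simp [ht], ?_⟩
    rw [List.all_map]
    apply List.all_eq_true.mpr
    intro c _
    simp only [Function.comp_apply]
    split_ifs <;> rfl

-- lines[0] read through pyGet? is the head of the line list
theorem pvHead (L : List String) : (PySem.List.pyGet? L 0).getD "" = L.headD "" := by
  cases L with
  | nil => simp [PySem.List.pyGet?, PySem.List.pyIdx?]
  | cons a t => rw [PySem.List.pyGet?_zero_cons]; simp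

theorem pvRepGetD (w j : Nat) : (List.replicate w (0:Int)).getD j 0 = 0 := by
  simp only [List.getD_eq_getElem?_getD, List.getElem?_replicate]
  split <;> simp

-- the arithmetic core: the two parsed bit strings multiply to gamma * (2^w - 1 - gamma)
theorem pvFinal (L : List String) (w : Nat) (h : Int) (counts : List Int)
    (hw : 0 < w) (hcl : counts.length = w)
    (hcg : ∀ j : Nat, counts.getD j 0 =
      ((L.countP (fun line => decide (j < line.toList.length ∧ line.toList.getD j ' ' = '0'))) : Int)) :
    (pvIntBase2? (counts.map (fun c => if c ≥ h then '0' else '1'))).getD 0 *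
    (pvIntBase2? (counts.map (fun c => if c ≥ h then '1' else '0'))).getD 0 =
    ((List.range w).foldl (fun (g : Int) j => g * 2 +
        (if (L.foldl (fun n line => if j < line.toList.length ∧ line.toList.getD j ' ' = '0' then n + 1 else n) 0) ≥ h
         then 0 else 1)) 0) *
    ((2 ^ w : Int) - 1 -
     (List.range w).foldl (fun (g : Int) j => g * 2 +
        (if (L.foldl (fun n line => if j < line.toList.length ∧ line.toList.getD j ' ' = '0' then n + 1 else n) 0) ≥ h
         then 0 else 1)) 0) := by
  have hcne : counts ≠ [] := by
    intro hnil; rw [hnil] at hcl; simp at hcl; omega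
  rw [pvValG h counts hcne, pvValE h counts hcne]
  simp only [Option.getD_some]
  have hsum := pvCompSum h counts 0 0
  rw [hcl] at hsum
  have h1 := pvFoldlRange (fun a c => a * 2 + (if c ≥ h then 0 else 1)) counts 0
  have hgam : counts.foldl (fun (a : Int) c => a * 2 + (if c ≥ h then 0 else 1)) 0 =
      (List.range w).foldl (fun (g : Int) j => g * 2 +
        (if (L.foldl (fun n line => if j < line.toList.length ∧ line.toList.getD j ' ' = '0' then n + 1 else n) 0) ≥ h
         then 0 else 1)) 0 := by
    rw [h1, hcl]
    apply PySem.List.foldl_congr_mem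
    intro acc j _
    rw [PySem.List.foldl_ite_add_one, zero_add, hcg j]
  rw [hgam] at hsum ⊢
  have hE : counts.foldl (fun (a : Int) c => a * 2 + (if c ≥ h then 1 else 0)) 0 =
      2 ^ w - 1 -
      (List.range w).foldl (fun (g : Int) j => g * 2 +
        (if (L.foldl (fun n line => if j < line.toList.length ∧ line.toList.getD j ' ' = '0' then n + 1 else n) 0) ≥ h
         then 0 else 1)) 0 := by linarith
  rw [hE]

theorem pvMain (s : String) (hp : Pre_compute s) : compute s = compute_alt s := by
  obtain ⟨hne, hw, hle⟩ := hp
  simp only [compute, compute_alt]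
  rw [pvHead, pvGeFold]
  simp only [List.nil_append]
  have hca := pvCountAll (PySem.Str.splitlines s)
      (List.replicate ((PySem.Str.splitlines s).headD "").toList.length 0)
      (by intro line hm; simp only [List.length_replicate]; exact hle line hm)
  apply pvFinal
  · exact hw
  · rw [hca.1, List.length_replicate]
  · intro j
    rw [hca.2 j, pvRepGetD, zero_add]

-- ===== VERDICT (by name: the statement is the Claim_ definition above) =====
theorem compute_spec : Claim_equal_compute := by
  intro s _ hp
  exact pvMain s hp
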